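-- pv_equiv track=rewrite | github.com/IntelLabs/multimodal_cognitive_ai | NeuroComparatives/Relational_Knowledge/NeuroLogic_generate.py | assign_order
-- ===== SOURCE A (Python) =====
-- def assign_order(constraint_list_str,order_type="default"):
--     if order_type == "default":
--         i = 0
--         for x in constraint_list_str:
--             if x["polarity"]:
--                 x["order"] = i
--                 i += 1
--             else:
--                 x["order"] = None
--     elif order_type == "first_order":
--         i = 0
--         for x in constraint_list_str:
--             if x["polarity"]:
--                 x["order"] = i
--             else:
--                 x["order"] = None
--     elif order_type == "entity_first_order":
--         i = 0
--         for x in constraint_list_str: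
--             if x["polarity"]:
--                 x["order"] = i
--                 if i == 1:
--                     pass
--                 else:
--                     i += 1
--             else:
--                 x["order"] = None
--
--     return constraint_list_str
-- ===== SOURCE B (Python) =====
-- # Staged passes instead of a running counter: count the polarity-true elements,
-- # materialize the whole order sequence for that count up front, then a second pass
-- # distributes the precomputed values. Mutates the dicts in place, like A.
-- def assign_order(constraint_list_str, order_type="default"):
--     if order_type == "default":
--         make = lambda n: list(range(n))
--     elif order_type == "first_order":
--         make = lambda n: [0] * n
--     elif order_type == "entity_first_order":
--         make = lambda n: [0] + [1] * (n - 1) if n else []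
--     else:
--         return constraint_list_str
--     n = sum(1 for x in constraint_list_str if x["polarity"])
--     orders = iter(make(n))
--     for x in constraint_list_str:
--         x["order"] = next(orders) if x["polarity"] else None
--     return constraint_list_str
-- ===== Notes on version B (the rewrite author's own statement) =====
-- stated objective: alternative
-- what changed: Replaces A's three per-mode counter loops with a staged computation: one pass counts the polarity-true elements, the full order sequence for that count is materialized up front (range(n), [0]*n, or [0]+[1]*(n-1)), and a second pass distributes these precomputed values; unknown order_type returns the list untouched.
import Mathlib
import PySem

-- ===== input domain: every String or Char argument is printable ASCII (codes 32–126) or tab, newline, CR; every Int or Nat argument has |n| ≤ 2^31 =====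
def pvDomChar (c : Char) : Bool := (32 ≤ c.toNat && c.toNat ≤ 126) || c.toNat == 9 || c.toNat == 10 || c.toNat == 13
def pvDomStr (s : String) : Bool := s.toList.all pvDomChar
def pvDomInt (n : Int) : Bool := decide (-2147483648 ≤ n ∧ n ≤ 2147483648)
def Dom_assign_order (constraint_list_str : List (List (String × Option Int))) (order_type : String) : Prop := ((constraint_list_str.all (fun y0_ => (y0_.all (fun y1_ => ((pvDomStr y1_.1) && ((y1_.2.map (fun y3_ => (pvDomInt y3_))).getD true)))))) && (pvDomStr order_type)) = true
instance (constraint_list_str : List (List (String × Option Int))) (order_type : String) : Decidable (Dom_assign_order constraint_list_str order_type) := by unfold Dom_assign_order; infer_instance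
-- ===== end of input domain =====

-- B replaces A's three counter loops by staged passes: count the polarity-true elements,
-- materialize the whole order sequence up front, then distribute it in a second pass.
-- Both Pythons mutate the dicts in place; the equivalence here is about the returned value.

-- x["polarity"] as a Python truth test: the value is None or an int; KeyError is excluded by Pre_.
def pvPolarity (x : List (String × Option Int)) : Bool :=
  match (PySem.Dict.mk x).get? "polarity" with
  | some (some n) => n != 0
  | _ => false

-- x["order"] = v  (dict assignment: overwrite keeps position, new key appends)
def pvSetOrder (x : List (String × Option Int)) (v : Option Int) : List (String × Option Int) :=
  ((PySem.Dict.mk x).insert "order" v).items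

-- ===== PORT A =====
def aDefault : List (List (String × Option Int)) → Int → List (List (String × Option Int))
  | [], _ => []
  | x :: rest, i =>
    if pvPolarity x then pvSetOrder x (some i) :: aDefault rest (i + 1)
    else pvSetOrder x none :: aDefault rest i

def aFirst : List (List (String × Option Int)) → Int → List (List (String × Option Int))
  | [], _ => []
  | x :: rest, i =>
    if pvPolarity x then pvSetOrder x (some i) :: aFirst rest i
    else pvSetOrder x none :: aFirst rest i

def aEntity : List (List (String × Option Int)) → Int → List (List (String × Option Int))
  | [], _ => []
  | x :: rest, i =>
    if pvPolarity x then
      pvSetOrder x (some i) :: aEntity rest (if i = 1 then i else i + 1)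
    else pvSetOrder x none :: aEntity rest i

def assign_order (constraint_list_str : List (List (String × Option Int))) (order_type : String) : List (List (String × Option Int)) :=
  if order_type = "default" then aDefault constraint_list_str 0
  else if order_type = "first_order" then aFirst constraint_list_str 0
  else if order_type = "entity_first_order" then aEntity constraint_list_str 0
  else constraint_list_str

-- ===== PORT B =====
-- pass 1 of Source B: n = sum(1 for x in constraint_list_str if x["polarity"])
def bCount : List (List (String × Option Int)) → Int
  | [] => 0
  | x :: rest => (if pvPolarity x then 1 else 0) + bCount rest

-- make(n): the whole order sequence, materialized up front
def bMake (order_type : String) (n : Int) : List Int :=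
  if order_type = "default" then PySem.List.pyRange 0 n 1
  else if order_type = "first_order" then List.replicate n.toNat 0
  else if n ≠ 0 then 0 :: List.replicate (n - 1).toNat 1 else []

-- pass 2 of Source B: distribute the precomputed orders (next(orders) never exhausts the
-- iterator by construction, so head?/tail is exact here)
def bAssign : List (List (String × Option Int)) → List Int → List (List (String × Option Int))
  | [], _ => []
  | x :: rest, orders =>
    if pvPolarity x then pvSetOrder x orders.head? :: bAssign rest orders.tail
    else pvSetOrder x none :: bAssign rest orders

def assign_order_alt (constraint_list_str : List (List (String × Option Int))) (order_type : String) : List (List (String × Option Int)) :=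
  if order_type = "default" ∨ order_type = "first_order" ∨ order_type = "entity_first_order" then
    bAssign constraint_list_str (bMake order_type (bCount constraint_list_str))
  else constraint_list_str

-- ===== PRECONDITION & SPEC =====
-- Pre_ excludes exactly the inputs where A raises KeyError: a recognized order_type with
-- some element dict lacking the key "polarity".
def Pre_assign_order (constraint_list_str : List (List (String × Option Int))) (order_type : String) : Prop :=
  (order_type = "default" ∨ order_type = "first_order" ∨ order_type = "entity_first_order") →
    ∀ x ∈ constraint_list_str, ((PySem.Dict.mk x).get? "polarity").isSome
instance (constraint_list_str : List (List (String × Option Int))) (order_type : String) : Decidable (Pre_assign_order constraint_list_str order_type) := by unfold Pre_assign_order; infer_instance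

def pvWitness_assign_order : (List (List (String × Option Int))) × String :=
  ([[("polarity", some 1)], [("polarity", none)], [("polarity", some 2)]], "entity_first_order")

def Spec_assign_order (constraint_list_str : List (List (String × Option Int))) (order_type : String) (out : List (List (String × Option Int))) : Prop := out = assign_order_alt constraint_list_str order_type
instance (constraint_list_str : List (List (String × Option Int))) (order_type : String) (out : List (List (String × Option Int))) : Decidable (Spec_assign_order constraint_list_str order_type out) := by unfold Spec_assign_order; infer_instance

-- ===== CLAIM (what is proved, stated in full; the proofs are below) =====
def Claim_equal_assign_order : Prop := ∀ (constraint_list_str : List (List (String × Option Int))) (order_type : String), Dom_assign_order constraint_list_str order_type → Pre_assign_order constraint_list_str order_type → Spec_assign_order constraint_list_str order_type (assign_order constraint_list_str order_type)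

-- ===== LEMMAS AND PROOFS =====
theorem bCount_nonneg (l : List (List (String × Option Int))) : 0 ≤ bCount l := by
  induction l with
  | nil => simp [bCount]
  | cons x rest ih => simp only [bCount]; split_ifs <;> omega

theorem aDefault_eq_bAssign (l : List (List (String × Option Int))) (i : Int) :
    aDefault l i = bAssign l (PySem.List.pyRange i (i + bCount l) 1) := by
  induction l generalizing i with
  | nil => rfl
  | cons x rest ih =>
    simp only [aDefault, bAssign, bCount]
    cases hp : pvPolarity x with
    | false => simp only [Bool.false_eq_true, if_false]; rw [ih i]; ring_nf
    | true =>
      simp only [if_true]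
      have hlt : i < i + (1 + bCount rest) := by have := bCount_nonneg rest; omega
      rw [PySem.List.pyRange_one_cons hlt]
      have : i + (1 + bCount rest) = (i + 1) + bCount rest := by ring
      rw [this]
      simp [ih (i + 1)]

theorem aFirst_eq_bAssign (l : List (List (String × Option Int))) (i : Int) (n : Nat)
    (hn : bCount l ≤ n) :
    aFirst l i = bAssign l (List.replicate n i) := by
  induction l generalizing n with
  | nil => rfl
  | cons x rest ih =>
    simp only [aFirst, bAssign]
    cases hp : pvPolarity x with
    | false =>
      simp only [bCount, hp, Bool.false_eq_true, if_false, zero_add] at hn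
      simp only [Bool.false_eq_true, if_false]
      rw [ih n hn]
    | true =>
      simp only [bCount, hp, if_true] at hn
      simp only [if_true]
      have hpos : 0 < n := by have := bCount_nonneg rest; omega
      obtain ⟨m, rfl⟩ := Nat.exists_eq_succ_of_ne_zero (by omega : n ≠ 0)
      simp only [List.replicate_succ, List.head?_cons, List.tail_cons]
      rw [ih m (by omega)]

theorem aEntity_one_eq (l : List (List (String × Option Int))) (n : Nat)
    (hn : bCount l ≤ n) :
    aEntity l 1 = bAssign l (List.replicate n 1) := by
  induction l generalizing n with
  | nil => rfl
  | cons x rest ih =>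
    simp only [aEntity, bAssign]
    cases hp : pvPolarity x with
    | false =>
      simp only [bCount, hp, Bool.false_eq_true, if_false, zero_add] at hn
      simp only [Bool.false_eq_true, if_false]
      rw [ih n hn]
    | true =>
      simp only [bCount, hp, if_true] at hn
      simp only [if_true]
      have hpos : 0 < n := by have := bCount_nonneg rest; omega
      obtain ⟨m, rfl⟩ := Nat.exists_eq_succ_of_ne_zero (by omega : n ≠ 0)
      simp only [List.replicate_succ, List.head?_cons, List.tail_cons]
      rw [ih m (by omega)]

theorem aEntity_eq_bAssign (l : List (List (String × Option Int))) :
    aEntity l 0 =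
      bAssign l (if bCount l ≠ 0 then 0 :: List.replicate (bCount l - 1).toNat 1 else []) := by
  induction l with
  | nil => rfl
  | cons x rest ih =>
    simp only [aEntity, bAssign, bCount]
    cases hp : pvPolarity x with
    | false =>
      simp only [hp, Bool.false_eq_true, if_false, zero_add]
      rw [ih]
    | true =>
      have hne : (1 : Int) + bCount rest ≠ 0 := by have := bCount_nonneg rest; omega
      simp only [hp, if_true, if_pos hne, List.head?_cons, List.tail_cons]
      have h1 : ((1 : Int) + bCount rest - 1).toNat = (bCount rest).toNat := by omega
      rw [h1]
      have h2 : (if (0:Int) = 1 then (0:Int) else 0 + 1) = 1 := by norm_num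
      rw [h2, aEntity_one_eq rest (bCount rest).toNat (by have := bCount_nonneg rest; omega)]

-- ===== VERDICT (by name: the statement is the Claim_ definition above) =====
theorem assign_order_spec : Claim_equal_assign_order := by
  intro cs ot _ _
  unfold Spec_assign_order assign_order assign_order_alt bMake
  by_cases h1 : ot = "default"
  · have := aDefault_eq_bAssign cs 0
    simp only [h1, if_true, if_pos (Or.inl rfl)]
    simpa using this
  · by_cases h2 : ot = "first_order"
    · simp only [h1, h2, if_false, if_true, if_pos (Or.inr (Or.inl rfl))]
      exact aFirst_eq_bAssign cs 0 (bCount cs).toNat (by omega)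
    · by_cases h3 : ot = "entity_first_order"
      · simp only [h1, h2, h3, if_false, if_true, if_pos (Or.inr (Or.inr rfl))]
        exact aEntity_eq_bAssign cs
      · simp [h1, h2, h3]
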